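-- pv_equiv track=rewrite | github.com/Pretty-boy1719/system_analysis_2025 | task1/task.py | build_relations
-- ===== SOURCE A (Python) =====
-- def build_relations(edge_list, index_map, nodes, root):
--     n = len(nodes)
--     r1 = [[False] * n for _ in range(n)]
--     r2 = [[False] * n for _ in range(n)]
--     r3 = [[False] * n for _ in range(n)]
--     r4 = [[False] * n for _ in range(n)]
--     r5 = [[False] * n for _ in range(n)]
--
--     # граф в виде списка потомков
--     tree = {node: [] for node in nodes}
--     for a, b in edge_list:
--         tree[a].append(b)
--
--     # прямые и обратные связи
--     for a, b in edge_list: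
--         i, j = index_map[a], index_map[b]
--         r1[i][j] = True
--         r2[j][i] = True
--
--     # обход в глубину
--     def explore(start, current, seen):
--         for nxt in tree[current]:
--             if nxt not in seen:
--                 seen.add(nxt)
--                 explore(start, nxt, seen)
--
--     # достижимость (косвенные связи)
--     for a in nodes:
--         reached = set()
--         explore(a, a, reached)
--         reached.discard(a)
--         for b in reached:
--             i, j = index_map[a], index_map[b]
--             if not r1[i][j]:
--                 r3[i][j] = True
--             if not r2[j][i]:
--                 r4[j][i] = True
--
--     # братья и сестры (общие родители)
--     for parent, kids in tree.items():
--         if len(kids) > 1: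
--             for i in range(len(kids)):
--                 for j in range(i + 1, len(kids)):
--                     x, y = kids[i], kids[j]
--                     ix, iy = index_map[x], index_map[y]
--                     r5[ix][iy] = r5[iy][ix] = True
--
--     return r1, r2, r3, r4, r5
-- ===== SOURCE B (Python) =====
-- def build_relations(edge_list, index_map, nodes, root):
--     n = len(nodes)
--     r1 = [[False] * n for _ in range(n)]
--     r2 = [[False] * n for _ in range(n)]
--     r3 = [[False] * n for _ in range(n)]
--     r4 = [[False] * n for _ in range(n)]
--     r5 = [[False] * n for _ in range(n)]
--
--     # direct and inverse links
--     for a, b in edge_list: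
--         i, j = index_map[a], index_map[b]
--         r1[i][j] = True
--         r2[j][i] = True
--
--     # transitive closure of the edge relation: Floyd-Warshall on name pairs
--     distinct = list(dict.fromkeys(nodes))
--     reach = set(edge_list)
--     for k in distinct:
--         for x in distinct:
--             for y in distinct:
--                 if (x, k) in reach and (k, y) in reach:
--                     reach.add((x, y))
--     for a, b in reach:
--         if a != b:
--             i, j = index_map[a], index_map[b]
--             if not r1[i][j]:
--                 r3[i][j] = True
--             if not r2[j][i]:
--                 r4[j][i] = True
--
--     # siblings: two edges sharing their source
--     m = len(edge_list)
--     for t in range(m):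
--         for u in range(t + 1, m):
--             if edge_list[t][0] == edge_list[u][0]:
--                 ix, iy = index_map[edge_list[t][1]], index_map[edge_list[u][1]]
--                 r5[ix][iy] = r5[iy][ix] = True
--
--     return r1, r2, r3, r4, r5
-- ===== Notes on version B (the rewrite author's own statement) =====
-- stated objective: alternative
-- what changed: B replaces A's per-node recursive DFS reachability with a single Floyd-Warshall transitive closure over a set of name pairs, and replaces A's per-parent child-list grouping (tree dict + index double loop) for siblings with a direct double scan over the edge list.
import Mathlib
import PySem

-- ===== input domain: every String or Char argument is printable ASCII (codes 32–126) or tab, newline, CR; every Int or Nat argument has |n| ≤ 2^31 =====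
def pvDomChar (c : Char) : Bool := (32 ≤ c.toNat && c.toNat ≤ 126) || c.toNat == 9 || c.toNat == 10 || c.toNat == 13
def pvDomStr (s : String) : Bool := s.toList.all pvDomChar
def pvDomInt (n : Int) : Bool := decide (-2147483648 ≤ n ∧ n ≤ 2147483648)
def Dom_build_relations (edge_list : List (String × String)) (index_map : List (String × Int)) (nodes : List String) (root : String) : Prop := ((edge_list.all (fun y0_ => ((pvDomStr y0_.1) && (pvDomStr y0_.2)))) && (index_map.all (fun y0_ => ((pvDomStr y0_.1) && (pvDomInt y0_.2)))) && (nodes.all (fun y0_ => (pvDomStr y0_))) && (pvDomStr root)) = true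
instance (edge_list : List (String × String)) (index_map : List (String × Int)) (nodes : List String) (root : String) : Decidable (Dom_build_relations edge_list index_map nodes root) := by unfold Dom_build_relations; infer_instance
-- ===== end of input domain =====

-- B replaces A's per-node recursive DFS with a Floyd–Warshall transitive closure on name
-- pairs and A's per-parent child-list grouping with a direct double scan over the edge list;
-- objective: alternative (a genuinely different algorithm, not claimed faster).

-- ----- shared Python-semantics helpers (list assignment with negative-index wrap, dict lookup) -----

-- index_map[a]: first matching entry (dict as association list), default 0 is never used inside Pre_
def pvIdxMap (im : List (String × Int)) (a : String) : Int :=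
  ((im.find? (fun p => p.1 == a)).map (·.2)).getD 0

-- Python's effective index for list write/read: negative indices count from the end
def pvWrap (n : Nat) (i : Int) : Int := if i < 0 then i + n else i

-- mat[i][j] = True  (no-op outside range; Pre_ keeps indices in Python's accepted range)
def pvSet2 (m : List (List Bool)) (i j : Int) : List (List Bool) :=
  m.modify (pvWrap m.length i).toNat (fun row => row.set (pvWrap row.length j).toNat true)

-- mat[i][j] (read; default false outside range, unreachable inside Pre_)
def pvGet2 (m : List (List Bool)) (i j : Int) : Bool :=
  let row := m.getD (pvWrap m.length i).toNat []
  row.getD (pvWrap row.length j).toNat false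

-- [[False]*n for _ in range(n)]
def pvMat (n : Nat) : List (List Bool) := List.replicate n (List.replicate n false)

-- ===== PORT A =====

-- tree = {node: [] for node in nodes}; for a,b in edge_list: tree[a].append(b)
def pvTreeOf (edge_list : List (String × String)) (nodes : List String) : PySem.Dict String (List String) :=
  edge_list.foldl (fun d p => d.modify p.1 [] (fun l => l ++ [p.2]))
    (nodes.foldl (fun d node => d.insert node []) PySem.Dict.empty)

-- def explore(start, current, seen): the for-loop over tree[current] as structural recursion;
-- fuel only forces termination (edge_list.length + 1 is proved sufficient: depth adds a fresh
-- target to seen each nesting)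
def pvExplore (tree : PySem.Dict String (List String)) :
    Nat → List String → PySem.Set String → PySem.Set String
  | _, [], seen => seen
  | fuel, nxt :: rest, seen =>
    if PySem.Set.contains seen nxt then pvExplore tree fuel rest seen
    else
      match fuel with
      | 0 => pvExplore tree 0 rest (PySem.Set.add seen nxt)
      | f + 1 =>
        pvExplore tree (f + 1) rest (pvExplore tree f (tree.getD nxt []) (PySem.Set.add seen nxt))
  termination_by fuel kids _ => (fuel, kids.length)

def build_relations (edge_list : List (String × String)) (index_map : List (String × Int)) (nodes : List String) (root : String) : List (List Bool) × List (List Bool) × List (List Bool) × List (List Bool) × List (List Bool) :=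
  let n := nodes.length
  let tree := pvTreeOf edge_list nodes
  let pr12 := edge_list.foldl (fun (pr : List (List Bool) × List (List Bool)) e =>
      (pvSet2 pr.1 (pvIdxMap index_map e.1) (pvIdxMap index_map e.2),
       pvSet2 pr.2 (pvIdxMap index_map e.2) (pvIdxMap index_map e.1))) (pvMat n, pvMat n)
  let r1 := pr12.1
  let r2 := pr12.2
  let pr34 := nodes.foldl (fun (pr : List (List Bool) × List (List Bool)) a =>
      let reached := PySem.Set.discard
        (pvExplore tree (edge_list.length + 1) (tree.getD a []) PySem.Set.empty) a
      reached.foldl (fun (pr : List (List Bool) × List (List Bool)) b =>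
        ((if !pvGet2 r1 (pvIdxMap index_map a) (pvIdxMap index_map b) then
            pvSet2 pr.1 (pvIdxMap index_map a) (pvIdxMap index_map b) else pr.1),
         (if !pvGet2 r2 (pvIdxMap index_map b) (pvIdxMap index_map a) then
            pvSet2 pr.2 (pvIdxMap index_map b) (pvIdxMap index_map a) else pr.2))) pr)
    (pvMat n, pvMat n)
  let r5 := tree.items.foldl (fun r5 pk =>
      if 1 < pk.2.length then
        (PySem.List.pyRange 0 (pk.2.length : Int) 1).foldl (fun r5 i =>
          (PySem.List.pyRange (i + 1) (pk.2.length : Int) 1).foldl (fun r5 j =>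
            let x := PySem.List.pyGetD pk.2 i ""
            let y := PySem.List.pyGetD pk.2 j ""
            pvSet2 (pvSet2 r5 (pvIdxMap index_map x) (pvIdxMap index_map y))
              (pvIdxMap index_map y) (pvIdxMap index_map x)) r5) r5
      else r5) (pvMat n)
  (r1, r2, pr34.1, pr34.2, r5)

-- ===== PORT B =====

-- the Floyd–Warshall triple loop over distinct node names, on a set of (name, name) pairs
def pvWarshall (distinct : List String) (R : PySem.Set (String × String)) : PySem.Set (String × String) :=
  distinct.foldl (fun R k =>
    distinct.foldl (fun R x =>
      distinct.foldl (fun R y =>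
        if R.contains (x, k) && R.contains (k, y) then R.add (x, y) else R) R) R) R

def build_relations_alt (edge_list : List (String × String)) (index_map : List (String × Int)) (nodes : List String) (root : String) : List (List Bool) × List (List Bool) × List (List Bool) × List (List Bool) × List (List Bool) :=
  let n := nodes.length
  let pr12 := edge_list.foldl (fun (pr : List (List Bool) × List (List Bool)) e =>
      (pvSet2 pr.1 (pvIdxMap index_map e.1) (pvIdxMap index_map e.2),
       pvSet2 pr.2 (pvIdxMap index_map e.2) (pvIdxMap index_map e.1))) (pvMat n, pvMat n)
  let r1 := pr12.1
  let r2 := pr12.2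
  let reach := pvWarshall (PySem.List.dedup nodes) (PySem.Set.ofList edge_list)
  let pr34 := reach.foldl (fun (pr : List (List Bool) × List (List Bool)) p =>
      if p.1 ≠ p.2 then
        ((if !pvGet2 r1 (pvIdxMap index_map p.1) (pvIdxMap index_map p.2) then
            pvSet2 pr.1 (pvIdxMap index_map p.1) (pvIdxMap index_map p.2) else pr.1),
         (if !pvGet2 r2 (pvIdxMap index_map p.2) (pvIdxMap index_map p.1) then
            pvSet2 pr.2 (pvIdxMap index_map p.2) (pvIdxMap index_map p.1) else pr.2))
      else pr) (pvMat n, pvMat n)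
  let m := edge_list.length
  let r5 := (PySem.List.pyRange 0 (m : Int) 1).foldl (fun r5 t =>
      (PySem.List.pyRange (t + 1) (m : Int) 1).foldl (fun r5 u =>
        let et := PySem.List.pyGetD edge_list t ("", "")
        let eu := PySem.List.pyGetD edge_list u ("", "")
        if et.1 == eu.1 then
          pvSet2 (pvSet2 r5 (pvIdxMap index_map et.2) (pvIdxMap index_map eu.2))
            (pvIdxMap index_map eu.2) (pvIdxMap index_map et.2)
        else r5) r5) (pvMat n)
  (r1, r2, pr34.1, pr34.2, r5)

-- ===== PRECONDITION & SPEC =====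

-- index_map[a] exists and is a Python-accepted list index (−n ≤ i < n, negative = wraparound)
def pvOkIdx (im : List (String × Int)) (a : String) (n : Nat) : Bool :=
  match im.find? (fun p => p.1 == a) with
  | some p => decide (-(n : Int) ≤ p.2 ∧ p.2 < (n : Int))
  | none => false

-- Exactly the inputs where the Python A returns: every edge endpoint is a node (else the tree
-- build / DFS raises KeyError) and has an index_map entry within Python list-index range
-- (else KeyError / IndexError).
def Pre_build_relations (edge_list : List (String × String)) (index_map : List (String × Int)) (nodes : List String) (root : String) : Prop :=
  (edge_list.all (fun e =>
    nodes.contains e.1 && nodes.contains e.2 &&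
    pvOkIdx index_map e.1 nodes.length && pvOkIdx index_map e.2 nodes.length)) = true

instance (edge_list : List (String × String)) (index_map : List (String × Int)) (nodes : List String) (root : String) : Decidable (Pre_build_relations edge_list index_map nodes root) := by unfold Pre_build_relations; infer_instance

def pvWitness_build_relations : (List (String × String)) × (List (String × Int)) × List String × String :=
  ([("a", "b"), ("a", "c"), ("b", "d")], [("a", 0), ("b", 1), ("c", 2), ("d", 3)], ["a", "b", "c", "d"], "a")

def Spec_build_relations (edge_list : List (String × String)) (index_map : List (String × Int)) (nodes : List String) (root : String) (out : List (List Bool) × List (List Bool) × List (List Bool) × List (List Bool) × List (List Bool)) : Prop := out = build_relations_alt edge_list index_map nodes root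
instance (edge_list : List (String × String)) (index_map : List (String × Int)) (nodes : List String) (root : String) (out : List (List Bool) × List (List Bool) × List (List Bool) × List (List Bool) × List (List Bool)) : Decidable (Spec_build_relations edge_list index_map nodes root out) := by unfold Spec_build_relations; infer_instance

-- ===== CLAIM (what is proved, stated in full; the proofs are below) =====
def Claim_equal_build_relations : Prop := ∀ (edge_list : List (String × String)) (index_map : List (String × Int)) (nodes : List String) (root : String), Dom_build_relations edge_list index_map nodes root → Pre_build_relations edge_list index_map nodes root → Spec_build_relations edge_list index_map nodes root (build_relations edge_list index_map nodes root)

-- ===== LEMMAS AND PROOFS =====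

-- row lengths of a matrix (shape); stable under pvSet2
def pvLens (m : List (List Bool)) : List Nat := m.map List.length

-- entry read with Nat coordinates (false outside)
def pvEntry (m : List (List Bool)) (p q : Nat) : Bool := (m.getD p []).getD q false

-- "pvSet2 m i j writes cell (p,q)" phrased against the shape only
def pvHit (rl : List Nat) (i j : Int) (p q : Nat) : Bool :=
  decide (p < rl.length) && (p == (pvWrap rl.length i).toNat) &&
  decide (q < rl.getD p 0) && (q == (pvWrap (rl.getD p 0) j).toNat)

-- children of c in A's tree, computed directly from the edge list
def pvCh (edge_list : List (String × String)) (c : String) : List String :=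
  (edge_list.filter (fun p => p.1 == c)).map (·.2)

-- edge relation
def pvEr (edge_list : List (String × String)) (a b : String) : Prop := (a, b) ∈ edge_list

-- "path from a to b whose interior vertices all lie in K" (Warshall's invariant)
inductive pvVia (E : String → String → Prop) : List String → String → String → Prop
  | base {K a b} : E a b → pvVia E K a b
  | comp {K a m b} : pvVia E K a m → m ∈ K → pvVia E K m b → pvVia E K a b

-- ordered pairs (earlier, later) of a list
def pvDP {α : Type} (l : List α) : List (α × α) :=
  match l with
  | [] => []
  | x :: t => t.map (fun y => (x, y)) ++ pvDP t

lemma pvLens_set2 (m : List (List Bool)) (i j : Int) : pvLens (pvSet2 m i j) = pvLens m := by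
  unfold pvSet2 pvLens
  apply List.ext_getElem?
  intro p
  simp only [List.getElem?_map, List.getElem?_modify]
  cases m[p]? <;> simp
  split <;> simp

lemma getD_eq_getElem_of_lt {α : Type} (l : List α) (d : α) (p : Nat) (hp : p < l.length) :
    l.getD p d = l[p] := by
  rw [List.getD_eq_getElem?_getD, List.getElem?_eq_getElem hp]; rfl

lemma getD_eq_of_le {α : Type} (l : List α) (d : α) (p : Nat) (hp : l.length ≤ p) :
    l.getD p d = d := by
  rw [List.getD_eq_getElem?_getD, List.getElem?_eq_none_iff.mpr hp]; rfl

lemma pvLens_getD (m : List (List Bool)) (p : Nat) (hp : p < m.length) :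
    (pvLens m).getD p 0 = m[p].length := by
  unfold pvLens
  rw [List.getD_eq_getElem?_getD, List.getElem?_map, List.getElem?_eq_getElem hp]; rfl

lemma pvEntry_set2 (m : List (List Bool)) (i j : Int) (p q : Nat) :
    pvEntry (pvSet2 m i j) p q = (pvEntry m p q || pvHit (pvLens m) i j p q) := by
  have hlen : (pvLens m).length = m.length := by simp [pvLens]
  unfold pvSet2 pvEntry pvHit
  rw [hlen]
  by_cases hp : p < m.length
  · have hgp : m[p]? = some m[p] := List.getElem?_eq_getElem hp
    rw [pvLens_getD m p hp, getD_eq_getElem_of_lt m [] p hp]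
    have hrow : (m.modify (pvWrap m.length i).toNat
        (fun row => row.set (pvWrap row.length j).toNat true)).getD p []
        = if (pvWrap m.length i).toNat = p
            then m[p].set (pvWrap m[p].length j).toNat true else m[p] := by
      rw [List.getD_eq_getElem?_getD, List.getElem?_modify, hgp]
      split <;> rfl
    rw [hrow]
    by_cases hkp : (pvWrap m.length i).toNat = p
    · rw [if_pos hkp]
      have h1 : (p == (pvWrap m.length i).toNat) = true := by simp [hkp]
      rw [List.getD_eq_getElem?_getD, List.getElem?_set]
      by_cases hq : (pvWrap m[p].length j).toNat = q
      · by_cases hql : q < m[p].length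
        · simp [hq, hql, hp, h1]
        · have hnone : m[p][q]? = none := by rw [List.getElem?_eq_none_iff]; omega
          simp [hq, hql, hp, h1, List.getD_eq_getElem?_getD]
      · have h2 : (q == (pvWrap m[p].length j).toNat) = false := by simp; omega
        simp [hq, h2, List.getD_eq_getElem?_getD]
    · simp only [if_neg hkp]
      have h1 : (p == (pvWrap m.length i).toNat) = false := by simp; omega
      simp [h1]
  · have h0 : (m.modify (pvWrap m.length i).toNat
        (fun row => row.set (pvWrap row.length j).toNat true)).getD p [] = [] := by
      apply getD_eq_of_le
      rw [List.length_modify]; omega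
    rw [h0, getD_eq_of_le m [] p (by omega)]
    simp [hp]

lemma pv_foldl_entry {α : Type} (l : List α) (step : List (List Bool) → α → List (List Bool))
    (P : α → Nat → Nat → Bool) (s0 : List Nat)
    (h : ∀ m x, pvLens m = s0 →
      pvLens (step m x) = s0 ∧ ∀ p q, pvEntry (step m x) p q = (pvEntry m p q || P x p q)) :
    ∀ m, pvLens m = s0 →
      pvLens (l.foldl step m) = s0 ∧
      ∀ p q, pvEntry (l.foldl step m) p q = (pvEntry m p q || l.any (fun x => P x p q)) := by
  induction l with
  | nil =>
    intro m hm
    refine ⟨hm, fun p q => ?_⟩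
    simp
  | cons x t ih =>
    intro m hm
    obtain ⟨h1, h2⟩ := h m x hm
    obtain ⟨ih1, ih2⟩ := ih (step m x) h1
    refine ⟨by simpa using ih1, fun p q => ?_⟩
    simp only [List.foldl_cons] at *
    rw [ih2, h2]
    simp [Bool.or_assoc]

lemma pv_mat_eq (m1 m2 : List (List Bool)) (hl : pvLens m1 = pvLens m2)
    (he : ∀ p q, pvEntry m1 p q = pvEntry m2 p q) : m1 = m2 := by
  have hlen : m1.length = m2.length := by
    have := congrArg List.length hl; simpa [pvLens] using this
  apply List.ext_getElem hlen
  intro p hp1 hp2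
  have hrl : m1[p].length = m2[p].length := by
    have h1 := pvLens_getD m1 p hp1
    have h2 := pvLens_getD m2 p hp2
    rw [hl] at h1; exact h1.symm.trans h2
  apply List.ext_getElem hrl
  intro q hq1 hq2
  have := he p q
  unfold pvEntry at this
  rw [getD_eq_getElem_of_lt m1 [] p hp1, getD_eq_getElem_of_lt m2 [] p hp2,
      getD_eq_getElem_of_lt _ false q hq1, getD_eq_getElem_of_lt _ false q hq2] at this
  exact this

lemma pvEntry_mat (n : Nat) (p q : Nat) : pvEntry (pvMat n) p q = false := by
  unfold pvEntry pvMat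
  by_cases hp : p < n
  · rw [getD_eq_getElem_of_lt _ _ p (by simpa using hp), List.getElem_replicate]
    by_cases hq : q < n
    · rw [getD_eq_getElem_of_lt _ _ q (by simpa using hq), List.getElem_replicate]
    · rw [getD_eq_of_le _ _ q (by simpa using Nat.le_of_not_lt hq)]
  · rw [getD_eq_of_le _ _ p (by simpa using Nat.le_of_not_lt hp)]; rfl

-- ----- tree facts -----

lemma mem_pvCh {el : List (String × String)} {a b : String} : b ∈ pvCh el a ↔ (a, b) ∈ el := by
  unfold pvCh
  simp only [List.mem_map, List.mem_filter]
  constructor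
  · rintro ⟨⟨x, y⟩, ⟨hmem, hx⟩, rfl⟩
    simp only [beq_iff_eq] at hx
    simpa [hx] using hmem
  · intro h
    exact ⟨(a, b), ⟨h, by simp⟩, rfl⟩

lemma pvTreeBase_getD (nodes : List String) (c : String) :
    (nodes.foldl (fun d node => d.insert node []) PySem.Dict.empty).getD c [] = ([] : List String) := by
  have : ∀ (d : PySem.Dict String (List String)), d.getD c [] = [] →
      (nodes.foldl (fun d node => d.insert node []) d).getD c [] = [] := by
    induction nodes with
    | nil => intro d hd; simpa using hd
    | cons x t ih =>
      intro d hd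
      simp only [List.foldl_cons]
      apply ih
      rw [PySem.Dict.getD_insert]
      split <;> simp [hd]
  exact this _ (by simp [pysem])

lemma pvTree_getD (el : List (String × String)) (nodes : List String) (c : String) :
    (pvTreeOf el nodes).getD c [] = pvCh el c := by
  unfold pvTreeOf
  rw [PySem.Dict.getD_foldl_modify_append, pvTreeBase_getD]
  rfl

lemma pvSet_update_of_mem (l : List String) :
    ∀ s : PySem.Set String, (∀ x ∈ l, x ∈ s) → PySem.Set.update s l = s := by
  induction l with
  | nil => intro s _; rfl
  | cons x t ih =>
    intro s hs
    show List.foldl PySem.Set.add (PySem.Set.add s x) t = s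
    have hadd : PySem.Set.add s x = s := by
      unfold PySem.Set.add
      rw [if_pos ((PySem.Set.contains_iff s x).mpr (hs x (by simp)))]
    rw [hadd]
    exact ih s (fun y hy => hs y (by simp [hy]))

lemma pvTree_keys (el : List (String × String)) (nodes : List String)
    (hsrc : ∀ e ∈ el, e.1 ∈ nodes) :
    (pvTreeOf el nodes).keys = PySem.Set.ofList nodes := by
  unfold pvTreeOf
  rw [PySem.Dict.keys_foldl_modify_key el (fun p => p.1) [] (fun d x => fun l => l ++ [x.2]),
      PySem.Dict.keys_foldl_insert]
  have hbase : PySem.Set.update (PySem.Dict.empty : PySem.Dict String (List String)).keys nodes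
      = PySem.Set.ofList nodes := rfl
  rw [hbase]
  apply pvSet_update_of_mem
  intro x hx
  simp only [List.mem_map] at hx
  obtain ⟨e, he, rfl⟩ := hx
  exact (PySem.Set.mem_ofList nodes e.1).mpr (hsrc e he)

lemma pvTree_items (el : List (String × String)) (nodes : List String)
    (hsrc : ∀ e ∈ el, e.1 ∈ nodes) :
    (pvTreeOf el nodes).items = (PySem.Set.ofList nodes).map (fun k => (k, pvCh el k)) := by
  have hnd : (pvTreeOf el nodes).keys.Nodup := by
    unfold pvTreeOf
    apply PySem.Dict.nodup_keys_foldl_modify_key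
    apply PySem.Dict.nodup_keys_foldl_insert
    exact PySem.Dict.nodup_keys_empty
  rw [PySem.Dict.items_eq_map_keys _ hnd [], pvTree_keys el nodes hsrc]
  apply List.map_congr_left
  intro k _
  rw [pvTree_getD]

-- ----- DFS (port A) characterization -----

lemma pvExplore_eq_nil (tree : PySem.Dict String (List String)) (f : Nat)
    (seen : PySem.Set String) : pvExplore tree f [] seen = seen := by
  rw [pvExplore.eq_def]

lemma pvExplore_eq_mem (tree : PySem.Dict String (List String)) (f : Nat) (nxt : String)
    (rest : List String) (seen : PySem.Set String) (h : PySem.Set.contains seen nxt = true) :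
    pvExplore tree f (nxt :: rest) seen = pvExplore tree f rest seen := by
  rw [pvExplore.eq_def]; dsimp only; rw [if_pos h]

lemma pvExplore_eq_zero (tree : PySem.Dict String (List String)) (nxt : String)
    (rest : List String) (seen : PySem.Set String) (h : ¬ PySem.Set.contains seen nxt = true) :
    pvExplore tree 0 (nxt :: rest) seen = pvExplore tree 0 rest (PySem.Set.add seen nxt) := by
  rw [pvExplore.eq_def]; dsimp only; rw [if_neg h]

lemma pvExplore_eq_succ (tree : PySem.Dict String (List String)) (f : Nat) (nxt : String)
    (rest : List String) (seen : PySem.Set String) (h : ¬ PySem.Set.contains seen nxt = true) :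
    pvExplore tree (f + 1) (nxt :: rest) seen
      = pvExplore tree (f + 1) rest
          (pvExplore tree f (tree.getD nxt []) (PySem.Set.add seen nxt)) := by
  rw [pvExplore.eq_def]; dsimp only; rw [if_neg h]

lemma pvExplore_mono (tree : PySem.Dict String (List String)) (f : Nat) (kids : List String)
    (seen : PySem.Set String) : ∀ x ∈ seen, x ∈ pvExplore tree f kids seen := by
  induction f, kids, seen using pvExplore.induct tree with
  | case1 f seen => intro x hx; rw [pvExplore_eq_nil]; exact hx
  | case2 fuel nxt rest seen h ih =>
    intro x hx
    rw [pvExplore_eq_mem _ _ _ _ _ h]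
    exact ih x hx
  | case3 nxt rest seen h ih =>
    intro x hx
    rw [pvExplore_eq_zero _ _ _ _ h]
    exact ih x ((PySem.Set.mem_add seen nxt x).mpr (Or.inl hx))
  | case4 nxt rest seen h f ih1 ih2 =>
    intro x hx
    rw [pvExplore_eq_succ _ _ _ _ _ h]
    exact ih2 x (ih1 x ((PySem.Set.mem_add seen nxt x).mpr (Or.inl hx)))

lemma pvExplore_sound (el : List (String × String)) (tree : PySem.Dict String (List String))
    (htree : ∀ c, tree.getD c [] = pvCh el c) (f : Nat) (kids : List String)
    (seen : PySem.Set String) (x : String) (hx : x ∈ pvExplore tree f kids seen) :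
    x ∈ seen ∨ ∃ y ∈ kids, x = y ∨ Relation.TransGen (pvEr el) y x := by
  induction f, kids, seen using pvExplore.induct tree with
  | case1 f seen => rw [pvExplore_eq_nil] at hx; exact Or.inl hx
  | case2 fuel nxt rest seen h ih =>
    rw [pvExplore_eq_mem _ _ _ _ _ h] at hx
    rcases ih hx with h1 | ⟨y, hy, h2⟩
    · exact Or.inl h1
    · exact Or.inr ⟨y, List.mem_cons_of_mem _ hy, h2⟩
  | case3 nxt rest seen h ih =>
    rw [pvExplore_eq_zero _ _ _ _ h] at hx
    rcases ih hx with h1 | ⟨y, hy, h2⟩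
    · rcases (PySem.Set.mem_add seen nxt x).mp h1 with h1 | rfl
      · exact Or.inl h1
      · exact Or.inr ⟨x, List.mem_cons_self, Or.inl rfl⟩
    · exact Or.inr ⟨y, List.mem_cons_of_mem _ hy, h2⟩
  | case4 nxt rest seen h f ih1 ih2 =>
    rw [pvExplore_eq_succ _ _ _ _ _ h] at hx
    rcases ih2 hx with h1 | ⟨y, hy, h2⟩
    · rcases ih1 h1 with h3 | ⟨y, hy, h4⟩
      · rcases (PySem.Set.mem_add seen nxt x).mp h3 with h3 | rfl
        · exact Or.inl h3
        · exact Or.inr ⟨x, List.mem_cons_self, Or.inl rfl⟩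
      · rw [htree] at hy
        have he : pvEr el nxt y := mem_pvCh.mp hy
        refine Or.inr ⟨nxt, List.mem_cons_self, Or.inr ?_⟩
        rcases h4 with rfl | h4
        · exact Relation.TransGen.single he
        · exact Relation.TransGen.head he h4
    · exact Or.inr ⟨y, List.mem_cons_of_mem _ hy, h2⟩

lemma pvExplore_complete (el : List (String × String)) (tree : PySem.Dict String (List String))
    (htree : ∀ c, tree.getD c [] = pvCh el c) (f : Nat) (kids : List String)
    (seen : PySem.Set String) :
    (∀ y ∈ kids, y ∈ (el.map (·.2)).toFinset) →
    ((el.map (·.2)).toFinset.filter (fun u => u ∉ seen)).card ≤ f →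
    (∀ y ∈ kids, y ∈ pvExplore tree f kids seen) ∧
    (∀ x ∈ pvExplore tree f kids seen, x ∉ seen →
      ∀ z ∈ pvCh el x, z ∈ pvExplore tree f kids seen) := by
  induction f, kids, seen using pvExplore.induct tree with
  | case1 f seen =>
    intro _ _
    refine ⟨by simp, ?_⟩
    intro x hx hxs
    rw [pvExplore_eq_nil] at hx
    exact absurd hx hxs
  | case2 fuel nxt rest seen h ih =>
    intro hkids hf
    have hnxt : nxt ∈ seen := (PySem.Set.contains_iff seen nxt).mp h
    rw [pvExplore_eq_mem _ _ _ _ _ h]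
    obtain ⟨A, B⟩ := ih (fun y hy => hkids y (List.mem_cons_of_mem _ hy)) hf
    refine ⟨?_, B⟩
    intro y hy
    rcases List.mem_cons.mp hy with rfl | hy
    · exact pvExplore_mono tree fuel rest seen y hnxt
    · exact A y hy
  | case3 nxt rest seen h ih =>
    intro hkids hf
    exfalso
    have hnxtU : nxt ∈ (el.map (·.2)).toFinset := hkids nxt List.mem_cons_self
    have hnxtseen : nxt ∉ seen := fun hmem => h ((PySem.Set.contains_iff seen nxt).mpr hmem)
    have hmem : nxt ∈ (el.map (·.2)).toFinset.filter (fun u => u ∉ seen) :=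
      Finset.mem_filter.mpr ⟨hnxtU, hnxtseen⟩
    have := Finset.card_pos.mpr ⟨nxt, hmem⟩
    omega
  | case4 nxt rest seen h f ih1 ih2 =>
    intro hkids hf
    have hnxtU : nxt ∈ (el.map (·.2)).toFinset := hkids nxt List.mem_cons_self
    have hnxtseen : nxt ∉ seen := fun hmem => h ((PySem.Set.contains_iff seen nxt).mpr hmem)
    have hfilter : (el.map (·.2)).toFinset.filter (fun u => u ∉ PySem.Set.add seen nxt) =
        ((el.map (·.2)).toFinset.filter (fun u => u ∉ seen)).erase nxt := by
      ext u
      simp only [Finset.mem_filter, Finset.mem_erase]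
      constructor
      · intro ⟨hu, hu2⟩
        have := (PySem.Set.mem_add seen nxt u)
        refine ⟨fun he => hu2 (this.mpr (Or.inr he)), hu, fun he => hu2 (this.mpr (Or.inl he))⟩
      · intro ⟨hne, hu, hu2⟩
        exact ⟨hu, fun he => by
          rcases (PySem.Set.mem_add seen nxt u).mp he with he | he
          · exact hu2 he
          · exact hne he⟩
    have hmem : nxt ∈ (el.map (·.2)).toFinset.filter (fun u => u ∉ seen) :=
      Finset.mem_filter.mpr ⟨hnxtU, hnxtseen⟩
    have hcard1 : ((el.map (·.2)).toFinset.filter (fun u => u ∉ PySem.Set.add seen nxt)).card ≤ f := by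
      rw [hfilter, Finset.card_erase_of_mem hmem]
      have := Finset.card_pos.mpr ⟨nxt, hmem⟩
      omega
    have hkids1 : ∀ y ∈ tree.getD nxt [], y ∈ (el.map (·.2)).toFinset := by
      intro y hy
      rw [htree] at hy
      have := mem_pvCh.mp hy
      exact List.mem_toFinset.mpr (List.mem_map.mpr ⟨(nxt, y), this, rfl⟩)
    obtain ⟨A1, B1⟩ := ih1 hkids1 hcard1
    set seen1 := pvExplore tree f (tree.getD nxt []) (PySem.Set.add seen nxt) with hseen1
    have hsub1 : ∀ u ∈ PySem.Set.add seen nxt, u ∈ seen1 := pvExplore_mono tree f _ _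
    have hsub0 : ∀ u ∈ seen, u ∈ seen1 :=
      fun u hu => hsub1 u ((PySem.Set.mem_add seen nxt u).mpr (Or.inl hu))
    have hcard2 : ((el.map (·.2)).toFinset.filter (fun u => u ∉ seen1)).card ≤ f + 1 := by
      refine le_trans (Finset.card_le_card ?_) hf
      intro u hu
      simp only [Finset.mem_filter] at hu ⊢
      exact ⟨hu.1, fun he => hu.2 (hsub0 u he)⟩
    obtain ⟨A2, B2⟩ := ih2 (fun y hy => hkids y (List.mem_cons_of_mem _ hy)) hcard2
    rw [pvExplore_eq_succ _ _ _ _ _ h]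
    set S := pvExplore tree (f + 1) rest seen1 with hS
    have hsub2 : ∀ u ∈ seen1, u ∈ S := pvExplore_mono tree (f + 1) rest seen1
    constructor
    · intro y hy
      rcases List.mem_cons.mp hy with rfl | hy
      · exact hsub2 y (hsub1 y ((PySem.Set.mem_add seen y y).mpr (Or.inr rfl)))
      · exact A2 y hy
    · intro x hxS hxseen z hz
      by_cases hx1 : x ∈ seen1
      · by_cases hx2 : x ∈ PySem.Set.add seen nxt
        · rcases (PySem.Set.mem_add seen nxt x).mp hx2 with hx2 | rfl
          · exact absurd hx2 hxseen
          · refine hsub2 z (A1 z ?_)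
            rw [htree]
            exact hz
        · exact hsub2 z (B1 x hx1 hx2 z hz)
      · exact B2 x hxS hx1 z hz

lemma tg_src {el : List (String × String)} {a b : String}
    (h : Relation.TransGen (pvEr el) a b) : ∃ z, (a, z) ∈ el := by
  induction h with
  | single h => exact ⟨_, h⟩
  | tail _ _ ih => exact ih

lemma pvReached_iff (el : List (String × String)) (tree : PySem.Dict String (List String))
    (htree : ∀ c, tree.getD c [] = pvCh el c) (a b : String) :
    b ∈ pvExplore tree (el.length + 1) (tree.getD a []) PySem.Set.empty ↔
      Relation.TransGen (pvEr el) a b := by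
  constructor
  · intro hb
    rcases pvExplore_sound el tree htree _ _ _ b hb with h | ⟨y, hy, hcase⟩
    · cases h
    · rw [htree] at hy
      have he : pvEr el a y := mem_pvCh.mp hy
      rcases hcase with rfl | htg
      · exact Relation.TransGen.single he
      · exact Relation.TransGen.head he htg
  · intro htg
    have hkids : ∀ y ∈ tree.getD a [], y ∈ (el.map (·.2)).toFinset := by
      intro y hy
      rw [htree] at hy
      exact List.mem_toFinset.mpr (List.mem_map.mpr ⟨(a, y), mem_pvCh.mp hy, rfl⟩)
    have hf : ((el.map (·.2)).toFinset.filter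
        (fun u => u ∉ (PySem.Set.empty : PySem.Set String))).card ≤ el.length + 1 := by
      have h1 : (el.map (·.2)).toFinset.filter
          (fun u => u ∉ (PySem.Set.empty : PySem.Set String)) = (el.map (·.2)).toFinset := by
        apply Finset.filter_true_of_mem
        intro u _
        exact List.not_mem_nil
      rw [h1]
      have := List.toFinset_card_le (el.map (·.2))
      simp only [List.length_map] at this
      omega
    obtain ⟨A, B⟩ := pvExplore_complete el tree htree (el.length + 1) (tree.getD a [])
      PySem.Set.empty hkids hf
    induction htg with
    | single h =>
      apply A
      rw [htree]
      exact mem_pvCh.mpr h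
    | tail htg h ih =>
      exact B _ ih List.not_mem_nil _ (mem_pvCh.mpr h)

-- ----- Warshall (port B) characterization -----

lemma pvVia_mono {E : String → String → Prop} {K K' : List String} (hKK : ∀ x ∈ K, x ∈ K')
    {a b : String} (h : pvVia E K a b) : pvVia E K' a b := by
  induction h with
  | base h => exact pvVia.base h
  | comp _ hm _ ih1 ih2 => exact pvVia.comp ih1 (hKK _ hm) ih2

lemma pvVia_nil {E : String → String → Prop} {a b : String} : pvVia E [] a b ↔ E a b := by
  constructor
  · intro h
    cases h with
    | base h => exact h
    | comp _ hm _ => cases hm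
  · exact pvVia.base

lemma pvVia_src {E : String → String → Prop} {K : List String} {a b : String}
    (h : pvVia E K a b) : ∃ z, E a z := by
  induction h with
  | base h => exact ⟨_, h⟩
  | comp _ _ _ ih1 _ => exact ih1

lemma pvVia_tgt {E : String → String → Prop} {K : List String} {a b : String}
    (h : pvVia E K a b) : ∃ z, E z b := by
  induction h with
  | base h => exact ⟨_, h⟩
  | comp _ _ _ _ ih2 => exact ih2

lemma pvVia_append_singleton {E : String → String → Prop} {K : List String} {k x y : String} :
    pvVia E (K ++ [k]) x y ↔ pvVia E K x y ∨ (pvVia E K x k ∧ pvVia E K k y) := by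
  constructor
  · intro h
    induction h with
    | base h => exact Or.inl (pvVia.base h)
    | comp h1 hm h2 ih1 ih2 =>
      rcases List.mem_append.mp hm with hmK | hmk
      · rcases ih1 with p1 | ⟨q1, q2⟩ <;> rcases ih2 with p2 | ⟨r1, r2⟩
        · exact Or.inl (pvVia.comp p1 hmK p2)
        · exact Or.inr ⟨pvVia.comp p1 hmK r1, r2⟩
        · exact Or.inr ⟨q1, pvVia.comp q2 hmK p2⟩
        · exact Or.inr ⟨q1, r2⟩
      · rename_i m
        have hmk' := List.mem_singleton.mp hmk
        subst hmk'
        refine Or.inr ⟨?_, ?_⟩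
        · rcases ih1 with p1 | ⟨q1, _⟩
          · exact p1
          · exact q1
        · rcases ih2 with p2 | ⟨_, r2⟩
          · exact p2
          · exact r2
  · rintro (h | ⟨h1, h2⟩)
    · exact pvVia_mono (fun z hz => List.mem_append.mpr (Or.inl hz)) h
    · exact pvVia.comp (pvVia_mono (fun z hz => List.mem_append.mpr (Or.inl hz)) h1)
        (List.mem_append.mpr (Or.inr (List.mem_singleton.mpr rfl)))
        (pvVia_mono (fun z hz => List.mem_append.mpr (Or.inl hz)) h2)

lemma pvVia_iff_transGen {E : String → String → Prop} {K : List String}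
    (hK : ∀ a b, E a b → a ∈ K) {x y : String} :
    pvVia E K x y ↔ Relation.TransGen E x y := by
  constructor
  · intro h
    induction h with
    | base h => exact Relation.TransGen.single h
    | comp _ _ _ ih1 ih2 => exact Relation.TransGen.trans ih1 ih2
  · intro h
    induction h with
    | single h => exact pvVia.base h
    | tail _ h ih => exact pvVia.comp ih (hK _ _ h) (pvVia.base h)

lemma pv_foldl_inv {β σ : Type} (Inv : σ → Prop) (l : List β) (step : σ → β → σ)
    (h : ∀ acc x, Inv acc → Inv (step acc x)) (acc : σ) (h0 : Inv acc) :
    Inv (l.foldl step acc) := by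
  induction l generalizing acc with
  | nil => exact h0
  | cons x t ih => exact ih _ (h acc x h0)

lemma pvW_inner_mono (k x : String) (ys : List String) (R : PySem.Set (String × String)) :
    ∀ p ∈ R, p ∈ ys.foldl (fun R y =>
      if R.contains (x, k) && R.contains (k, y) then R.add (x, y) else R) R := by
  intro p hp
  apply pv_foldl_inv (Inv := fun R' => p ∈ R') _ _ _ _ hp
  intro acc y hacc
  split
  · exact (PySem.Set.mem_add acc (x, y) p).mpr (Or.inl hacc)
  · exact hacc

lemma pvW_outer_mono (k : String) (D xs : List String) (R : PySem.Set (String × String)) :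
    ∀ p ∈ R, p ∈ xs.foldl (fun R x => D.foldl (fun R y =>
      if R.contains (x, k) && R.contains (k, y) then R.add (x, y) else R) R) R := by
  intro p hp
  apply pv_foldl_inv (Inv := fun R' => p ∈ R') _ _ _ _ hp
  intro acc x hacc
  exact pvW_inner_mono k x D acc p hacc

lemma pvW_inner_complete (k x y : String) (ys : List String) (R : PySem.Set (String × String))
    (h1 : (x, k) ∈ R) (h2 : (k, y) ∈ R) (hy : y ∈ ys) :
    (x, y) ∈ ys.foldl (fun R y =>
      if R.contains (x, k) && R.contains (k, y) then R.add (x, y) else R) R := by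
  induction ys generalizing R with
  | nil => cases hy
  | cons y0 t ih =>
    simp only [List.foldl_cons]
    rcases List.mem_cons.mp hy with rfl | hyt
    · have hc : (R.contains (x, k) && R.contains (k, y)) = true := by
        rw [(PySem.Set.contains_iff R (x, k)).mpr h1, (PySem.Set.contains_iff R (k, y)).mpr h2]
        rfl
      rw [if_pos hc]
      exact pvW_inner_mono k x t _ _ ((PySem.Set.mem_add R (x, y) (x, y)).mpr (Or.inr rfl))
    · apply ih _ _ _ hyt
      · split
        · exact (PySem.Set.mem_add R (x, y0) (x, k)).mpr (Or.inl h1)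
        · exact h1
      · split
        · exact (PySem.Set.mem_add R (x, y0) (k, y)).mpr (Or.inl h2)
        · exact h2

lemma pvW_outer_complete (k x y : String) (D xs : List String) (R : PySem.Set (String × String))
    (h1 : (x, k) ∈ R) (h2 : (k, y) ∈ R) (hx : x ∈ xs) (hy : y ∈ D) :
    (x, y) ∈ xs.foldl (fun R x => D.foldl (fun R y =>
      if R.contains (x, k) && R.contains (k, y) then R.add (x, y) else R) R) R := by
  induction xs generalizing R with
  | nil => cases hx
  | cons x0 t ih =>
    simp only [List.foldl_cons]
    rcases List.mem_cons.mp hx with rfl | hxt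
    · exact pvW_outer_mono k D t _ _ (pvW_inner_complete k x y D R h1 h2 hy)
    · exact ih _ (pvW_inner_mono k x0 D R _ h1) (pvW_inner_mono k x0 D R _ h2) hxt

lemma pvW_pass {E : String → String → Prop} (D : List String) (k : String) (P : List String)
    (R : PySem.Set (String × String)) (hR : ∀ p, p ∈ R ↔ pvVia E P p.1 p.2)
    (hD : ∀ a b, E a b → a ∈ D ∧ b ∈ D) :
    ∀ p, p ∈ D.foldl (fun R x => D.foldl (fun R y =>
        if R.contains (x, k) && R.contains (k, y) then R.add (x, y) else R) R) R ↔
      pvVia E (P ++ [k]) p.1 p.2 := by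
  intro p
  constructor
  · intro hp
    have hsound : ∀ q ∈ (D.foldl (fun R x => D.foldl (fun R y =>
        if R.contains (x, k) && R.contains (k, y) then R.add (x, y) else R) R) R),
        pvVia E (P ++ [k]) q.1 q.2 := by
      refine pv_foldl_inv (fun (R' : PySem.Set (String × String)) => ∀ q ∈ R', pvVia E (P ++ [k]) q.1 q.2) _ _ ?_ _ ?_
      · intro acc x hInv
        refine pv_foldl_inv (fun (R' : PySem.Set (String × String)) => ∀ q ∈ R', pvVia E (P ++ [k]) q.1 q.2) _ _ ?_ _ hInv
        intro acc2 y hInv2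
        by_cases hc : (acc2.contains (x, k) && acc2.contains (k, y)) = true
        · rw [if_pos hc]
          intro q hq
          rcases (PySem.Set.mem_add acc2 (x, y) q).mp hq with hq | rfl
          · exact hInv2 q hq
          · have hcl := Bool.and_eq_true_iff.mp hc
            have hv1 := hInv2 (x, k) ((PySem.Set.contains_iff acc2 (x, k)).mp hcl.1)
            have hv2 := hInv2 (k, y) ((PySem.Set.contains_iff acc2 (k, y)).mp hcl.2)
            exact pvVia.comp hv1 (List.mem_append.mpr (Or.inr (List.mem_singleton.mpr rfl))) hv2
        · rw [if_neg hc]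
          exact hInv2
      · intro q hq
        exact pvVia_mono (fun z hz => List.mem_append.mpr (Or.inl hz)) ((hR q).mp hq)
    exact hsound p hp
  · intro hvia
    rcases pvVia_append_singleton.mp hvia with hP | ⟨h1, h2⟩
    · exact pvW_outer_mono k D D R p ((hR p).mpr hP)
    · obtain ⟨z1, hz1⟩ := pvVia_src h1
      obtain ⟨z2, hz2⟩ := pvVia_tgt h2
      have hx : p.1 ∈ D := (hD _ _ hz1).1
      have hy : p.2 ∈ D := (hD _ _ hz2).2
      have m1 : (p.1, k) ∈ R := (hR (p.1, k)).mpr h1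
      have m2 : (k, p.2) ∈ R := (hR (k, p.2)).mpr h2
      have := pvW_outer_complete k p.1 p.2 D D R m1 m2 hx hy
      simpa using this

lemma pvWarshall_iff {E : String → String → Prop} (D : List String)
    (R0 : PySem.Set (String × String)) (hR0 : ∀ p, p ∈ R0 ↔ E p.1 p.2)
    (hD : ∀ a b, E a b → a ∈ D ∧ b ∈ D) :
    ∀ p, p ∈ pvWarshall D R0 ↔ pvVia E D p.1 p.2 := by
  have haux : ∀ (ks : List String) (R : PySem.Set (String × String)) (P : List String),
      (∀ p, p ∈ R ↔ pvVia E P p.1 p.2) →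
      ∀ p, p ∈ ks.foldl (fun R k => D.foldl (fun R x => D.foldl (fun R y =>
          if R.contains (x, k) && R.contains (k, y) then R.add (x, y) else R) R) R) R ↔
        pvVia E (P ++ ks) p.1 p.2 := by
    intro ks
    induction ks with
    | nil =>
      intro R P hR p
      simpa using hR p
    | cons k t ih =>
      intro R P hR p
      simp only [List.foldl_cons]
      have hpass := pvW_pass D k P R hR hD
      have := ih _ (P ++ [k]) hpass p
      rw [this]
      simp
  intro p
  have hnil : ∀ q : String × String, q ∈ R0 ↔ pvVia E [] q.1 q.2 := by
    intro q
    rw [hR0 q]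
    exact pvVia_nil.symm
  have := haux D R0 [] hnil p
  simpa [pvWarshall] using this

lemma pvReach_mem (el : List (String × String)) (nodes : List String)
    (hsrc : ∀ e ∈ el, e.1 ∈ nodes) (htgt : ∀ e ∈ el, e.2 ∈ nodes) (p : String × String) :
    p ∈ pvWarshall (PySem.List.dedup nodes) (PySem.Set.ofList el) ↔
      Relation.TransGen (pvEr el) p.1 p.2 := by
  have hdd : ∀ x : String, x ∈ PySem.List.dedup nodes ↔ x ∈ nodes := by
    intro x
    exact PySem.Set.mem_ofList nodes x
  have hD : ∀ a b, pvEr el a b → a ∈ PySem.List.dedup nodes ∧ b ∈ PySem.List.dedup nodes := by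
    intro a b h
    exact ⟨(hdd a).mpr (hsrc (a, b) h), (hdd b).mpr (htgt (a, b) h)⟩
  have hR0 : ∀ q : String × String, q ∈ PySem.Set.ofList el ↔ pvEr el q.1 q.2 := by
    intro q
    rw [PySem.Set.mem_ofList]
    rfl
  rw [pvWarshall_iff (PySem.List.dedup nodes) _ hR0 hD p]
  exact pvVia_iff_transGen (fun a b h => (hD a b h).1)

-- ----- ordered pairs -----

lemma mem_pvDP {α : Type} {l : List α} {p : α × α} :
    p ∈ pvDP l ↔ ∃ i j : Nat, i < j ∧ l[i]? = some p.1 ∧ l[j]? = some p.2 := by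
  induction l with
  | nil => simp [pvDP]
  | cons x t ih =>
    simp only [pvDP, List.mem_append, List.mem_map, ih]
    constructor
    · rintro (⟨y, hy, rfl⟩ | ⟨i, j, hij, h1, h2⟩)
      · obtain ⟨j, hj, hy'⟩ := List.mem_iff_getElem.mp hy
        exact ⟨0, j + 1, by omega, by simp, by rw [List.getElem?_cons_succ, List.getElem?_eq_getElem hj, hy']⟩
      · exact ⟨i + 1, j + 1, by omega, by simpa, by simpa⟩
    · rintro ⟨i, j, hij, h1, h2⟩
      match i, j with
      | 0, 0 => omega
      | 0, j + 1 =>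
        left
        simp only [List.getElem?_cons_zero, Option.some_inj] at h1
        simp only [List.getElem?_cons_succ] at h2
        refine ⟨p.2, List.mem_of_getElem? h2, ?_⟩
        rw [h1]
      | i + 1, j + 1 =>
        right
        simp only [List.getElem?_cons_succ] at h1 h2
        exact ⟨i, j, by omega, h1, h2⟩

lemma mem_of_mem_pvDP {α : Type} {l : List α} {p : α × α} (h : p ∈ pvDP l) :
    p.1 ∈ l ∧ p.2 ∈ l := by
  obtain ⟨i, j, _, h1, h2⟩ := mem_pvDP.mp h
  exact ⟨List.mem_of_getElem? h1, List.mem_of_getElem? h2⟩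

lemma length_of_mem_pvDP {α : Type} {l : List α} {p : α × α} (h : p ∈ pvDP l) :
    1 < l.length := by
  obtain ⟨i, j, hij, _, h2⟩ := mem_pvDP.mp h
  have := (List.getElem?_eq_some_iff.mp h2).1
  omega

lemma pvDP_filter {α : Type} (pr : α → Bool) (l : List α) :
    pvDP (l.filter pr) = (pvDP l).filter (fun p => pr p.1 && pr p.2) := by
  induction l with
  | nil => rfl
  | cons x t ih =>
    by_cases hx : pr x
    · have e1 : List.filter pr (x :: t) = x :: List.filter pr t := by
        rw [List.filter_cons, if_pos (by simp [hx])]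
      rw [e1]
      show List.map (fun y => (x, y)) (List.filter pr t) ++ pvDP (List.filter pr t)
        = List.filter (fun p => pr p.1 && pr p.2) (List.map (fun y => (x, y)) t ++ pvDP t)
      rw [ih, List.filter_append, List.filter_map]
      congr 2
      apply List.filter_congr
      intro y _
      simp [hx]
    · have e1 : List.filter pr (x :: t) = List.filter pr t := by
        rw [List.filter_cons, if_neg (by simp [hx])]
      rw [e1, ih]
      show _ = List.filter (fun p => pr p.1 && pr p.2) (List.map (fun y => (x, y)) t ++ pvDP t)
      rw [List.filter_append, List.filter_map]
      have hnil : List.filter ((fun (p : α × α) => pr p.1 && pr p.2) ∘ fun y => (x, y)) t = [] :=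
        List.filter_eq_nil_iff.mpr (fun y _ => by simp [hx])
      rw [hnil]
      rfl

lemma pvDP_map {α β : Type} (f : α → β) (l : List α) :
    pvDP (l.map f) = (pvDP l).map (fun p => (f p.1, f p.2)) := by
  induction l with
  | nil => rfl
  | cons x t ih =>
    simp only [pvDP, List.map_cons, List.map_append, List.map_map, ih]
    rfl

-- the i < j double range loop reads exactly the ordered pairs
lemma any_range_pairs {α : Type} (l : List α) (d : α) (H : α → α → Bool) :
    ((PySem.List.pyRange 0 (l.length : Int) 1).any (fun i =>
      (PySem.List.pyRange (i + 1) (l.length : Int) 1).any (fun j =>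
        H (PySem.List.pyGetD l i d) (PySem.List.pyGetD l j d)))) =
    (pvDP l).any (fun p => H p.1 p.2) := by
  rw [Bool.eq_iff_iff]
  simp only [List.any_eq_true, PySem.List.mem_pyRange_one]
  constructor
  · rintro ⟨i, ⟨hi0, hil⟩, j, ⟨hj1, hjl⟩, hH⟩
    have hj0 : (0 : Int) ≤ j := by omega
    rw [PySem.List.pyGetD_of_nonneg _ _ hi0, PySem.List.pyGetD_of_nonneg _ _ hj0] at hH
    have hiN : i.toNat < l.length := by omega
    have hjN : j.toNat < l.length := by omega
    rw [getD_eq_getElem_of_lt _ _ _ hiN, getD_eq_getElem_of_lt _ _ _ hjN] at hH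
    refine ⟨(l[i.toNat], l[j.toNat]), mem_pvDP.mpr ⟨i.toNat, j.toNat, by omega,
      List.getElem?_eq_getElem hiN, List.getElem?_eq_getElem hjN⟩, hH⟩
  · rintro ⟨p, hp, hH⟩
    obtain ⟨i, j, hij, h1, h2⟩ := mem_pvDP.mp hp
    have hil := (List.getElem?_eq_some_iff.mp h1).1
    have hjl := (List.getElem?_eq_some_iff.mp h2).1
    refine ⟨(i : Int), ⟨by omega, by omega⟩, (j : Int), ⟨by omega, by omega⟩, ?_⟩
    rw [PySem.List.pyGetD_of_nonneg _ _ (by omega), PySem.List.pyGetD_of_nonneg _ _ (by omega)]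
    simp only [Int.toNat_natCast]
    rw [getD_eq_getElem_of_lt _ _ _ hil, getD_eq_getElem_of_lt _ _ _ hjl]
    have e1 : l[i] = p.1 := by simpa [List.getElem?_eq_getElem hil] using h1
    have e2 : l[j] = p.2 := by simpa [List.getElem?_eq_getElem hjl] using h2
    rw [e1, e2]
    exact hH

-- ----- assembly: per-matrix equality of the two programs -----

lemma pv_step_mark (C : Bool) (i j : Int) (m : List (List Bool)) (s0 : List Nat)
    (hm : pvLens m = s0) :
    pvLens (if C then pvSet2 m i j else m) = s0 ∧
    ∀ p q, pvEntry (if C then pvSet2 m i j else m) p q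
      = (pvEntry m p q || (C && pvHit s0 i j p q)) := by
  cases C
  · simpa using hm
  · refine ⟨by rw [if_pos rfl, pvLens_set2]; exact hm, fun p q => ?_⟩
    rw [if_pos rfl, pvEntry_set2, hm]
    simp

lemma pv_step_mark2 (i j i' j' : Int) (m : List (List Bool)) (s0 : List Nat)
    (hm : pvLens m = s0) :
    pvLens (pvSet2 (pvSet2 m i j) i' j') = s0 ∧
    ∀ p q, pvEntry (pvSet2 (pvSet2 m i j) i' j') p q
      = (pvEntry m p q || (pvHit s0 i j p q || pvHit s0 i' j' p q)) := by
  refine ⟨by rw [pvLens_set2, pvLens_set2]; exact hm, fun p q => ?_⟩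
  rw [pvEntry_set2, pvEntry_set2, pvLens_set2, hm]
  simp [Bool.or_assoc]

lemma pv_step_mark2c (C : Bool) (i j i' j' : Int) (m : List (List Bool)) (s0 : List Nat)
    (hm : pvLens m = s0) :
    pvLens (if C then pvSet2 (pvSet2 m i j) i' j' else m) = s0 ∧
    ∀ p q, pvEntry (if C then pvSet2 (pvSet2 m i j) i' j' else m) p q
      = (pvEntry m p q || (C && (pvHit s0 i j p q || pvHit s0 i' j' p q))) := by
  cases C
  · simpa using hm
  · obtain ⟨h1, h2⟩ := pv_step_mark2 i j i' j' m s0 hm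
    refine ⟨by rw [if_pos rfl]; exact h1, fun p q => ?_⟩
    rw [if_pos rfl, h2 p q]
    simp

lemma pv_guard_dpany {α : Type} (l : List α) (f : α × α → Bool) :
    (decide (1 < l.length) && (pvDP l).any f) = (pvDP l).any f := by
  rw [Bool.eq_iff_iff]
  simp only [Bool.and_eq_true, decide_eq_true_eq, List.any_eq_true]
  constructor
  · rintro ⟨_, h⟩; exact h
  · rintro ⟨p, hp, hf⟩; exact ⟨length_of_mem_pvDP hp, ⟨p, hp, hf⟩⟩

lemma pv_r34_core (el : List (String × String)) (nodes : List String)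
    (hsrc : ∀ e ∈ el, e.1 ∈ nodes) (htgt : ∀ e ∈ el, e.2 ∈ nodes)
    (F : String → String → Bool) (I J : String → String → Int) (n : Nat) :
    nodes.foldl (fun (r : List (List Bool)) a =>
      (PySem.Set.discard (pvExplore (pvTreeOf el nodes) (el.length + 1)
          ((pvTreeOf el nodes).getD a []) PySem.Set.empty) a).foldl
        (fun r b => if F a b then pvSet2 r (I a b) (J a b) else r) r) (pvMat n)
    = (pvWarshall (PySem.List.dedup nodes) (PySem.Set.ofList el)).foldl
        (fun r p => if decide (p.1 ≠ p.2) && F p.1 p.2 then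
          pvSet2 r (I p.1 p.2) (J p.1 p.2) else r) (pvMat n) := by
  have htree : ∀ c, (pvTreeOf el nodes).getD c [] = pvCh el c := pvTree_getD el nodes
  obtain ⟨hl1, he1⟩ := pv_foldl_entry nodes _ (fun a p q =>
      (PySem.Set.discard (pvExplore (pvTreeOf el nodes) (el.length + 1)
          ((pvTreeOf el nodes).getD a []) PySem.Set.empty) a).any
        (fun b => F a b && pvHit (pvLens (pvMat n)) (I a b) (J a b) p q)) (pvLens (pvMat n))
      (fun m a hm => pv_foldl_entry _ _
        (fun b p q => F a b && pvHit (pvLens (pvMat n)) (I a b) (J a b) p q) (pvLens (pvMat n))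
        (fun m' b hm' => pv_step_mark (F a b) (I a b) (J a b) m' _ hm') m hm)
      (pvMat n) rfl
  obtain ⟨hl2, he2⟩ := pv_foldl_entry
      (pvWarshall (PySem.List.dedup nodes) (PySem.Set.ofList el)) _ (fun p pp qq =>
        (decide (p.1 ≠ p.2) && F p.1 p.2) && pvHit (pvLens (pvMat n)) (I p.1 p.2) (J p.1 p.2) pp qq)
      (pvLens (pvMat n))
      (fun m p hm => pv_step_mark (decide (p.1 ≠ p.2) && F p.1 p.2) (I p.1 p.2) (J p.1 p.2) m _ hm)
      (pvMat n) rfl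
  apply pv_mat_eq _ _ (hl1.trans hl2.symm)
  intro p q
  rw [he1 p q, he2 p q, pvEntry_mat]
  simp only [Bool.false_or]
  rw [Bool.eq_iff_iff]
  simp only [List.any_eq_true]
  constructor
  · rintro ⟨a, ha, hb⟩
    obtain ⟨b, hbmem, hcond⟩ := hb
    obtain ⟨hbex, hbne⟩ := (PySem.Set.mem_discard _ a b).mp hbmem
    have htg := (pvReached_iff el _ htree a b).mp hbex
    refine ⟨(a, b), (pvReach_mem el nodes hsrc htgt (a, b)).mpr htg, ?_⟩
    have hab : a ≠ b := Ne.symm hbne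
    simpa [hab, Bool.and_assoc] using hcond
  · rintro ⟨pp, hpp, hcond⟩
    rw [Bool.and_assoc, Bool.and_eq_true] at hcond
    have hne : pp.1 ≠ pp.2 := of_decide_eq_true hcond.1
    have htg := (pvReach_mem el nodes hsrc htgt pp).mp hpp
    obtain ⟨z, hz⟩ := tg_src htg
    refine ⟨pp.1, hsrc (pp.1, z) hz, ?_⟩
    exact ⟨pp.2, (PySem.Set.mem_discard _ _ _).mpr
      ⟨(pvReached_iff el _ htree pp.1 pp.2).mpr htg, Ne.symm hne⟩, hcond.2⟩

lemma pv_r5_eq (el : List (String × String)) (nodes : List String)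
    (im : List (String × Int)) (hsrc : ∀ e ∈ el, e.1 ∈ nodes) (n : Nat) :
    (pvTreeOf el nodes).items.foldl (fun r5 pk =>
      if 1 < pk.2.length then
        (PySem.List.pyRange 0 (pk.2.length : Int) 1).foldl (fun r5 i =>
          (PySem.List.pyRange (i + 1) (pk.2.length : Int) 1).foldl (fun r5 j =>
            pvSet2 (pvSet2 r5 (pvIdxMap im (PySem.List.pyGetD pk.2 i ""))
                (pvIdxMap im (PySem.List.pyGetD pk.2 j "")))
              (pvIdxMap im (PySem.List.pyGetD pk.2 j ""))
              (pvIdxMap im (PySem.List.pyGetD pk.2 i ""))) r5) r5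
      else r5) (pvMat n)
    = (PySem.List.pyRange 0 (el.length : Int) 1).foldl (fun r5 t =>
        (PySem.List.pyRange (t + 1) (el.length : Int) 1).foldl (fun r5 u =>
          if (PySem.List.pyGetD el t ("", "")).1 == (PySem.List.pyGetD el u ("", "")).1 then
            pvSet2 (pvSet2 r5 (pvIdxMap im (PySem.List.pyGetD el t ("", "")).2)
                (pvIdxMap im (PySem.List.pyGetD el u ("", "")).2))
              (pvIdxMap im (PySem.List.pyGetD el u ("", "")).2)
              (pvIdxMap im (PySem.List.pyGetD el t ("", "")).2)
          else r5) r5) (pvMat n) := by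
  obtain ⟨hl1, he1⟩ := pv_foldl_entry (pvTreeOf el nodes).items
      (fun r5 pk =>
        if 1 < pk.2.length then
          (PySem.List.pyRange 0 (pk.2.length : Int) 1).foldl (fun r5 i =>
            (PySem.List.pyRange (i + 1) (pk.2.length : Int) 1).foldl (fun r5 j =>
              pvSet2 (pvSet2 r5 (pvIdxMap im (PySem.List.pyGetD pk.2 i ""))
                  (pvIdxMap im (PySem.List.pyGetD pk.2 j "")))
                (pvIdxMap im (PySem.List.pyGetD pk.2 j ""))
                (pvIdxMap im (PySem.List.pyGetD pk.2 i ""))) r5) r5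
        else r5)
      (fun pk p q =>
      decide (1 < pk.2.length) &&
        (PySem.List.pyRange 0 (pk.2.length : Int) 1).any (fun i =>
          (PySem.List.pyRange (i + 1) (pk.2.length : Int) 1).any (fun j =>
            pvHit (pvLens (pvMat n)) (pvIdxMap im (PySem.List.pyGetD pk.2 i ""))
                (pvIdxMap im (PySem.List.pyGetD pk.2 j "")) p q ||
              pvHit (pvLens (pvMat n)) (pvIdxMap im (PySem.List.pyGetD pk.2 j ""))
                (pvIdxMap im (PySem.List.pyGetD pk.2 i "")) p q))) (pvLens (pvMat n))
      (fun m pk hm => by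
        by_cases hg : 1 < pk.2.length
        · simp only [if_pos hg]
          obtain ⟨hlm, hem⟩ := pv_foldl_entry (PySem.List.pyRange 0 (pk.2.length : Int) 1)
            (fun r5 i =>
              (PySem.List.pyRange (i + 1) (pk.2.length : Int) 1).foldl (fun r5 j =>
                pvSet2 (pvSet2 r5 (pvIdxMap im (PySem.List.pyGetD pk.2 i ""))
                    (pvIdxMap im (PySem.List.pyGetD pk.2 j "")))
                  (pvIdxMap im (PySem.List.pyGetD pk.2 j ""))
                  (pvIdxMap im (PySem.List.pyGetD pk.2 i ""))) r5)
            (fun i p q => (PySem.List.pyRange (i + 1) (pk.2.length : Int) 1).any (fun j =>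
              pvHit (pvLens (pvMat n)) (pvIdxMap im (PySem.List.pyGetD pk.2 i ""))
                  (pvIdxMap im (PySem.List.pyGetD pk.2 j "")) p q ||
                pvHit (pvLens (pvMat n)) (pvIdxMap im (PySem.List.pyGetD pk.2 j ""))
                  (pvIdxMap im (PySem.List.pyGetD pk.2 i "")) p q)) (pvLens (pvMat n))
            (fun m2 i hm2 => pv_foldl_entry (PySem.List.pyRange (i + 1) (pk.2.length : Int) 1)
              (fun r5 j =>
                pvSet2 (pvSet2 r5 (pvIdxMap im (PySem.List.pyGetD pk.2 i ""))
                    (pvIdxMap im (PySem.List.pyGetD pk.2 j "")))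
                  (pvIdxMap im (PySem.List.pyGetD pk.2 j ""))
                  (pvIdxMap im (PySem.List.pyGetD pk.2 i "")))
              (fun j p q =>
                pvHit (pvLens (pvMat n)) (pvIdxMap im (PySem.List.pyGetD pk.2 i ""))
                    (pvIdxMap im (PySem.List.pyGetD pk.2 j "")) p q ||
                  pvHit (pvLens (pvMat n)) (pvIdxMap im (PySem.List.pyGetD pk.2 j ""))
                    (pvIdxMap im (PySem.List.pyGetD pk.2 i "")) p q) (pvLens (pvMat n))
              (fun m3 j hm3 => pv_step_mark2 _ _ _ _ m3 _ hm3) m2 hm2) m hm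
          refine ⟨hlm, fun p q => ?_⟩
          rw [hem p q, decide_eq_true hg, Bool.true_and]
        · simp only [if_neg hg]
          refine ⟨hm, fun p q => ?_⟩
          rw [decide_eq_false hg, Bool.false_and, Bool.or_false])
      (pvMat n) rfl
  obtain ⟨hl2, he2⟩ := pv_foldl_entry (PySem.List.pyRange 0 (el.length : Int) 1)
      (fun r5 t =>
        (PySem.List.pyRange (t + 1) (el.length : Int) 1).foldl (fun r5 u =>
          if (PySem.List.pyGetD el t ("", "")).1 == (PySem.List.pyGetD el u ("", "")).1 then
            pvSet2 (pvSet2 r5 (pvIdxMap im (PySem.List.pyGetD el t ("", "")).2)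
                (pvIdxMap im (PySem.List.pyGetD el u ("", "")).2))
              (pvIdxMap im (PySem.List.pyGetD el u ("", "")).2)
              (pvIdxMap im (PySem.List.pyGetD el t ("", "")).2)
          else r5) r5)
      (fun t p q => (PySem.List.pyRange (t + 1) (el.length : Int) 1).any (fun u =>
        ((PySem.List.pyGetD el t ("", "")).1 == (PySem.List.pyGetD el u ("", "")).1) &&
          (pvHit (pvLens (pvMat n)) (pvIdxMap im (PySem.List.pyGetD el t ("", "")).2)
              (pvIdxMap im (PySem.List.pyGetD el u ("", "")).2) p q ||
            pvHit (pvLens (pvMat n)) (pvIdxMap im (PySem.List.pyGetD el u ("", "")).2)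
              (pvIdxMap im (PySem.List.pyGetD el t ("", "")).2) p q))) (pvLens (pvMat n))
      (fun m t hm => pv_foldl_entry (PySem.List.pyRange (t + 1) (el.length : Int) 1)
        (fun r5 u =>
          if (PySem.List.pyGetD el t ("", "")).1 == (PySem.List.pyGetD el u ("", "")).1 then
            pvSet2 (pvSet2 r5 (pvIdxMap im (PySem.List.pyGetD el t ("", "")).2)
                (pvIdxMap im (PySem.List.pyGetD el u ("", "")).2))
              (pvIdxMap im (PySem.List.pyGetD el u ("", "")).2)
              (pvIdxMap im (PySem.List.pyGetD el t ("", "")).2)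
          else r5)
        (fun u p q =>
          ((PySem.List.pyGetD el t ("", "")).1 == (PySem.List.pyGetD el u ("", "")).1) &&
            (pvHit (pvLens (pvMat n)) (pvIdxMap im (PySem.List.pyGetD el t ("", "")).2)
                (pvIdxMap im (PySem.List.pyGetD el u ("", "")).2) p q ||
              pvHit (pvLens (pvMat n)) (pvIdxMap im (PySem.List.pyGetD el u ("", "")).2)
                (pvIdxMap im (PySem.List.pyGetD el t ("", "")).2) p q)) (pvLens (pvMat n))
        (fun m2 u hm2 => pv_step_mark2c _ _ _ _ _ m2 _ hm2) m hm)
      (pvMat n) rfl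
  apply pv_mat_eq _ _ (hl1.trans hl2.symm)
  intro p q
  rw [he1 p q, he2 p q, pvEntry_mat]
  simp only [Bool.false_or]
  rw [pvTree_items el nodes hsrc,
    any_range_pairs el ("", "") (fun et eu => ((et.1 == eu.1) &&
      (pvHit (pvLens (pvMat n)) (pvIdxMap im et.2) (pvIdxMap im eu.2) p q ||
        pvHit (pvLens (pvMat n)) (pvIdxMap im eu.2) (pvIdxMap im et.2) p q))),
    Bool.eq_iff_iff]
  simp only [List.any_eq_true, List.mem_map]
  constructor
  · rintro ⟨pk, ⟨k, hk, rfl⟩, hcond⟩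
    dsimp only at hcond
    rw [any_range_pairs (pvCh el k) ""
      (fun x y => pvHit (pvLens (pvMat n)) (pvIdxMap im x) (pvIdxMap im y) p q ||
        pvHit (pvLens (pvMat n)) (pvIdxMap im y) (pvIdxMap im x) p q),
      pv_guard_dpany] at hcond
    simp only [List.any_eq_true] at hcond
    obtain ⟨pr2, hpr2, hf⟩ := hcond
    rw [show pvCh el k = (el.filter (fun x => x.1 == k)).map (fun x => x.2) from rfl,
      pvDP_map, pvDP_filter] at hpr2
    simp only [List.mem_map, List.mem_filter, Bool.and_eq_true, beq_iff_eq] at hpr2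
    obtain ⟨pr, ⟨hprel, h1k, h2k⟩, rfl⟩ := hpr2
    refine ⟨pr, hprel, ?_⟩
    dsimp only at hf ⊢
    rw [h1k, h2k, beq_self_eq_true, Bool.true_and]
    exact hf
  · rintro ⟨pr, hpr, hcond⟩
    rw [Bool.and_eq_true, beq_iff_eq] at hcond
    obtain ⟨heq, hhit⟩ := hcond
    refine ⟨(pr.1.1, pvCh el pr.1.1), ⟨pr.1.1,
      (PySem.Set.mem_ofList nodes pr.1.1).mpr (hsrc pr.1 (mem_of_mem_pvDP hpr).1), rfl⟩, ?_⟩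
    dsimp only
    rw [any_range_pairs (pvCh el pr.1.1) ""
      (fun x y => pvHit (pvLens (pvMat n)) (pvIdxMap im x) (pvIdxMap im y) p q ||
        pvHit (pvLens (pvMat n)) (pvIdxMap im y) (pvIdxMap im x) p q),
      pv_guard_dpany]
    simp only [List.any_eq_true]
    refine ⟨(pr.1.2, pr.2.2), ?_, ?_⟩
    · rw [show pvCh el pr.1.1 = (el.filter (fun x => x.1 == pr.1.1)).map (fun x => x.2) from rfl,
        pvDP_map, pvDP_filter]
      simp only [List.mem_map, List.mem_filter, Bool.and_eq_true, beq_iff_eq]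
      exact ⟨pr, ⟨hpr, rfl, heq.symm⟩, rfl⟩
    · dsimp only
      exact hhit

lemma pv_splitA (el : List (String × String)) (im : List (String × Int)) (nodes : List String)
    (r1 r2 : List (List Bool)) (n : Nat) :
    nodes.foldl (fun (pr : List (List Bool) × List (List Bool)) a =>
      (PySem.Set.discard (pvExplore (pvTreeOf el nodes) (el.length + 1)
          ((pvTreeOf el nodes).getD a []) PySem.Set.empty) a).foldl
        (fun (pr : List (List Bool) × List (List Bool)) b =>
          ((if !pvGet2 r1 (pvIdxMap im a) (pvIdxMap im b) then
              pvSet2 pr.1 (pvIdxMap im a) (pvIdxMap im b) else pr.1),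
           (if !pvGet2 r2 (pvIdxMap im b) (pvIdxMap im a) then
              pvSet2 pr.2 (pvIdxMap im b) (pvIdxMap im a) else pr.2))) pr) (pvMat n, pvMat n)
    = (nodes.foldl (fun r a =>
        (PySem.Set.discard (pvExplore (pvTreeOf el nodes) (el.length + 1)
            ((pvTreeOf el nodes).getD a []) PySem.Set.empty) a).foldl
          (fun r b => if !pvGet2 r1 (pvIdxMap im a) (pvIdxMap im b) then
            pvSet2 r (pvIdxMap im a) (pvIdxMap im b) else r) r) (pvMat n),
       nodes.foldl (fun r a =>
        (PySem.Set.discard (pvExplore (pvTreeOf el nodes) (el.length + 1)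
            ((pvTreeOf el nodes).getD a []) PySem.Set.empty) a).foldl
          (fun r b => if !pvGet2 r2 (pvIdxMap im b) (pvIdxMap im a) then
            pvSet2 r (pvIdxMap im b) (pvIdxMap im a) else r) r) (pvMat n)) := by
  have hstep : (fun (pr : List (List Bool) × List (List Bool)) (a : String) =>
      (PySem.Set.discard (pvExplore (pvTreeOf el nodes) (el.length + 1)
          ((pvTreeOf el nodes).getD a []) PySem.Set.empty) a).foldl
        (fun (pr : List (List Bool) × List (List Bool)) b =>
          ((if !pvGet2 r1 (pvIdxMap im a) (pvIdxMap im b) then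
              pvSet2 pr.1 (pvIdxMap im a) (pvIdxMap im b) else pr.1),
           (if !pvGet2 r2 (pvIdxMap im b) (pvIdxMap im a) then
              pvSet2 pr.2 (pvIdxMap im b) (pvIdxMap im a) else pr.2))) pr)
      = (fun (pr : List (List Bool) × List (List Bool)) (a : String) =>
        ((PySem.Set.discard (pvExplore (pvTreeOf el nodes) (el.length + 1)
            ((pvTreeOf el nodes).getD a []) PySem.Set.empty) a).foldl
          (fun r b => if !pvGet2 r1 (pvIdxMap im a) (pvIdxMap im b) then
            pvSet2 r (pvIdxMap im a) (pvIdxMap im b) else r) pr.1,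
         (PySem.Set.discard (pvExplore (pvTreeOf el nodes) (el.length + 1)
            ((pvTreeOf el nodes).getD a []) PySem.Set.empty) a).foldl
          (fun r b => if !pvGet2 r2 (pvIdxMap im b) (pvIdxMap im a) then
            pvSet2 r (pvIdxMap im b) (pvIdxMap im a) else r) pr.2)) := by
    funext pr a
    exact PySem.List.foldl_prod_mk
      (f := fun r b => if !pvGet2 r1 (pvIdxMap im a) (pvIdxMap im b) then
        pvSet2 r (pvIdxMap im a) (pvIdxMap im b) else r)
      (g := fun r b => if !pvGet2 r2 (pvIdxMap im b) (pvIdxMap im a) then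
        pvSet2 r (pvIdxMap im b) (pvIdxMap im a) else r) _ pr.1 pr.2
  rw [hstep]
  exact PySem.List.foldl_prod_mk
    (f := fun r a =>
      (PySem.Set.discard (pvExplore (pvTreeOf el nodes) (el.length + 1)
          ((pvTreeOf el nodes).getD a []) PySem.Set.empty) a).foldl
        (fun r b => if !pvGet2 r1 (pvIdxMap im a) (pvIdxMap im b) then
          pvSet2 r (pvIdxMap im a) (pvIdxMap im b) else r) r)
    (g := fun r a =>
      (PySem.Set.discard (pvExplore (pvTreeOf el nodes) (el.length + 1)
          ((pvTreeOf el nodes).getD a []) PySem.Set.empty) a).foldl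
        (fun r b => if !pvGet2 r2 (pvIdxMap im b) (pvIdxMap im a) then
          pvSet2 r (pvIdxMap im b) (pvIdxMap im a) else r) r) _ _ _

lemma pv_splitB (im : List (String × Int)) (reach : PySem.Set (String × String))
    (r1 r2 : List (List Bool)) (n : Nat) :
    reach.foldl (fun (pr : List (List Bool) × List (List Bool)) p =>
      if p.1 ≠ p.2 then
        ((if !pvGet2 r1 (pvIdxMap im p.1) (pvIdxMap im p.2) then
            pvSet2 pr.1 (pvIdxMap im p.1) (pvIdxMap im p.2) else pr.1),
         (if !pvGet2 r2 (pvIdxMap im p.2) (pvIdxMap im p.1) then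
            pvSet2 pr.2 (pvIdxMap im p.2) (pvIdxMap im p.1) else pr.2))
      else pr) (pvMat n, pvMat n)
    = (reach.foldl (fun r p => if decide (p.1 ≠ p.2) && !pvGet2 r1 (pvIdxMap im p.1) (pvIdxMap im p.2) then
          pvSet2 r (pvIdxMap im p.1) (pvIdxMap im p.2) else r) (pvMat n),
       reach.foldl (fun r p => if decide (p.1 ≠ p.2) && !pvGet2 r2 (pvIdxMap im p.2) (pvIdxMap im p.1) then
          pvSet2 r (pvIdxMap im p.2) (pvIdxMap im p.1) else r) (pvMat n)) := by
  have hstep : (fun (pr : List (List Bool) × List (List Bool)) (p : String × String) =>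
      if p.1 ≠ p.2 then
        ((if !pvGet2 r1 (pvIdxMap im p.1) (pvIdxMap im p.2) then
            pvSet2 pr.1 (pvIdxMap im p.1) (pvIdxMap im p.2) else pr.1),
         (if !pvGet2 r2 (pvIdxMap im p.2) (pvIdxMap im p.1) then
            pvSet2 pr.2 (pvIdxMap im p.2) (pvIdxMap im p.1) else pr.2))
      else pr)
      = (fun (pr : List (List Bool) × List (List Bool)) (p : String × String) =>
        ((if decide (p.1 ≠ p.2) && !pvGet2 r1 (pvIdxMap im p.1) (pvIdxMap im p.2) then
            pvSet2 pr.1 (pvIdxMap im p.1) (pvIdxMap im p.2) else pr.1),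
         (if decide (p.1 ≠ p.2) && !pvGet2 r2 (pvIdxMap im p.2) (pvIdxMap im p.1) then
            pvSet2 pr.2 (pvIdxMap im p.2) (pvIdxMap im p.1) else pr.2))) := by
    funext pr p
    by_cases hd : p.1 = p.2
    · simp [hd]
    · simp [hd]
  rw [hstep]
  exact PySem.List.foldl_prod_mk
    (f := fun r (p : String × String) =>
      if decide (p.1 ≠ p.2) && !pvGet2 r1 (pvIdxMap im p.1) (pvIdxMap im p.2) then
        pvSet2 r (pvIdxMap im p.1) (pvIdxMap im p.2) else r)
    (g := fun r (p : String × String) =>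
      if decide (p.1 ≠ p.2) && !pvGet2 r2 (pvIdxMap im p.2) (pvIdxMap im p.1) then
        pvSet2 r (pvIdxMap im p.2) (pvIdxMap im p.1) else r) _ _ _

-- ===== VERDICT (by name: the statement is the Claim_ definition above) =====
theorem build_relations_spec : Claim_equal_build_relations := by
  intro el im nodes root _hdom hpre
  unfold Pre_build_relations at hpre
  have hall := List.all_eq_true.mp hpre
  have hsrc : ∀ e ∈ el, e.1 ∈ nodes := by
    intro e he
    have h := hall e he
    simp only [Bool.and_eq_true, List.contains_iff_mem] at h
    exact h.1.1.1
  have htgt : ∀ e ∈ el, e.2 ∈ nodes := by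
    intro e he
    have h := hall e he
    simp only [Bool.and_eq_true, List.contains_iff_mem] at h
    exact h.1.1.2
  unfold Spec_build_relations build_relations build_relations_alt
  dsimp only
  refine congrArg₂ Prod.mk rfl (congrArg₂ Prod.mk rfl ?_)
  rw [pv_splitA el im nodes, pv_splitB im]
  dsimp only
  refine congrArg₂ Prod.mk ?_ (congrArg₂ Prod.mk ?_ ?_)
  · exact pv_r34_core el nodes hsrc htgt _ _ _ nodes.length
  · exact pv_r34_core el nodes hsrc htgt _ _ _ nodes.length
  · exact pv_r5_eq el nodes im hsrc nodes.length
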